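-- pv_equiv track=rewrite | github.com/hiroshi833/haisha-site | solve_vrp.py | ensure_all_vehicles_used
-- ===== SOURCE A (Python) =====
-- def ensure_all_vehicles_used(routes, customer_count, vehicle_count):
--     routes = [list(r) for r in routes]
--     # while exists empty route, move from largest (if possible)
--     while sum(1 for r in routes if len(r) == 0) > 0:
--         # find biggest with >1
--         idx_big = max(range(len(routes)), key=lambda i: len(routes[i]))
--         if len(routes[idx_big]) <= 1:
--             # cannot move further
--             break
--         idx_empty = next(i for i,r in enumerate(routes) if len(r) == 0)
--         moved = routes[idx_big].pop()
--         routes[idx_empty].append(moved)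
--     return routes
-- ===== SOURCE B (Python) =====
-- def ensure_all_vehicles_used(routes, customer_count, vehicle_count):
--     # One pass over lengths per empty slot; no list mutation: record, for each
--     # initially-empty route, which element it receives, and build the result
--     # at the end by slicing donors.
--     lens = [len(r) for r in routes]
--     fill = [None] * len(routes)
--     for e in [i for i, l in enumerate(lens) if l == 0]:
--         src, best = -1, 1
--         for i, l in enumerate(lens):
--             if l > best:
--                 src, best = i, l
--         if src < 0:
--             break
--         lens[src] -= 1
--         fill[e] = routes[src][lens[src]]
--     return [[f] if f is not None else list(r)[:l]
--             for r, l, f in zip(routes, lens, fill)]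
-- ===== Notes on version B (the rewrite author's own statement) =====
-- stated objective: alternative
-- what changed: B never mutates the routes: it simulates the moves on an integer length array only (single argmax scan per empty slot, empties enumerated once up front), records which element each empty route receives, and builds the whole output at the end by slicing each donor route.
import Mathlib
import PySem

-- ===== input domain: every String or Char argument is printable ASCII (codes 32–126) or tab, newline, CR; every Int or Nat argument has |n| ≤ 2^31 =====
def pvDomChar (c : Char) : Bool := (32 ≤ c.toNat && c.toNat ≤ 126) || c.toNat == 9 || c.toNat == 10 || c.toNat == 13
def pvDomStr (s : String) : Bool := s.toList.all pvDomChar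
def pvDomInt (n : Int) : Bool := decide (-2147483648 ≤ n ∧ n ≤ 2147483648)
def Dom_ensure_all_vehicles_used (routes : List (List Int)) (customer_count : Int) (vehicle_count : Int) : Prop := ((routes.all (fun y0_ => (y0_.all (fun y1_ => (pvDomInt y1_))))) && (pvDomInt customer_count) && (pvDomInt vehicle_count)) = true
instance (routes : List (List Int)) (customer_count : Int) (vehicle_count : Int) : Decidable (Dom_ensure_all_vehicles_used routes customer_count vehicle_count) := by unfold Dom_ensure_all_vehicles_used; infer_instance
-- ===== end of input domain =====

-- B re-implements A without mutating the routes: it simulates the moves on a length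
-- array only and assembles the result at the end (objective: alternative algorithm).

-- ===== PORT A =====
-- Python's max(range(len(rs)), key=lambda i: len(rs[i])): a left scan keeping the
-- FIRST index whose key is maximal (strictly-greater replaces); exact for nonempty rs,
-- which is the only way A reaches it.
def pvArgmaxA (rs : List (List Int)) : Nat × Nat :=
  rs.zipIdx.foldl (fun best q => if best.2 < q.1.length then (q.2, q.1.length) else best) (0, 0)

-- the while loop; fuel = routes.length bounds the iterations (each one fills one
-- empty route for good), so the fuel never runs out before the loop's own exit.
def pvLoopA : Nat → List (List Int) → List (List Int)
  | 0, cur => cur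
  | fuel+1, cur =>
    if 0 < cur.countP (fun r => r.isEmpty) then
      let ib := (pvArgmaxA cur).1
      let big := cur.getD ib []
      if big.length ≤ 1 then cur
      else
        let cur1 := cur.set ib big.dropLast        -- routes[idx_big].pop()
        let ie := cur.findIdx (fun r => r.isEmpty) -- next(i for i,r … if len(r)==0)
        pvLoopA fuel (cur1.set ie ((cur1.getD ie []) ++ [big.getLastD 0]))
    else cur

def ensure_all_vehicles_used (routes : List (List Int)) (customer_count : Int) (vehicle_count : Int) : List (List Int) :=
  -- routes = [list(r) for r in routes] copies; for pure values it is the identity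
  pvLoopA routes.length (routes.map (fun r => r))

-- ===== PORT B =====
-- B's inner scan: src, best = -1, 1; replace on strictly greater length.
def pvArgmaxB (lens : List Nat) : Int × Nat :=
  lens.zipIdx.foldl (fun best q => if best.2 < q.1 then ((q.2 : Int), q.1) else best) (-1, 1)

-- the for-loop over the initially-empty indices (indices in range throughout,
-- so getD with defaults is exact for Python's indexing here)
def pvLoopB (routes : List (List Int)) : List Nat → List Nat → List (Option Int) → List Nat × List (Option Int)
  | [], lens, fill => (lens, fill)
  | e :: es, lens, fill =>
    let sb := pvArgmaxB lens
    if sb.1 < 0 then (lens, fill)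
    else
      let s := sb.1.toNat
      let lens' := lens.set s (lens.getD s 0 - 1)
      pvLoopB routes es lens' (fill.set e (some ((routes.getD s []).getD (lens'.getD s 0) 0)))

-- the final comprehension: [[f] if f is not None else list(r)[:l] for r, l, f in zip(...)]
def pvBuild (routes : List (List Int)) (lens : List Nat) (fill : List (Option Int)) : List (List Int) :=
  (routes.zip (lens.zip fill)).map (fun p => match p.2.2 with | some v => [v] | none => p.1.take p.2.1)

def ensure_all_vehicles_used_alt (routes : List (List Int)) (customer_count : Int) (vehicle_count : Int) : List (List Int) :=
  let lens := routes.map List.length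
  let empties := (lens.zipIdx.filter (fun q => q.1 == 0)).map (fun q => q.2)
  let r := pvLoopB routes empties lens (routes.map (fun _ => none))
  pvBuild routes r.1 r.2

-- ===== PRECONDITION & SPEC =====
def Spec_ensure_all_vehicles_used (routes : List (List Int)) (customer_count : Int) (vehicle_count : Int) (out : List (List Int)) : Prop := out = ensure_all_vehicles_used_alt routes customer_count vehicle_count
instance (routes : List (List Int)) (customer_count : Int) (vehicle_count : Int) (out : List (List Int)) : Decidable (Spec_ensure_all_vehicles_used routes customer_count vehicle_count out) := by unfold Spec_ensure_all_vehicles_used; infer_instance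

-- ===== CLAIM (what is proved, stated in full; the proofs are below) =====
def Claim_equal_ensure_all_vehicles_used : Prop := ∀ (routes : List (List Int)) (customer_count : Int) (vehicle_count : Int), Dom_ensure_all_vehicles_used routes customer_count vehicle_count → Spec_ensure_all_vehicles_used routes customer_count vehicle_count (ensure_all_vehicles_used routes customer_count vehicle_count)

-- ===== LEMMAS AND PROOFS =====

-- Invariant tying A's concrete route list `cur` to B's bookkeeping (lens, fill) and
-- the remaining queue `es` of still-empty indices.
def pvInv (R : List (List Int)) (es : List Nat) (lens : List Nat) (fill : List (Option Int)) (cur : List (List Int)) : Prop :=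
  cur = pvBuild R lens fill ∧
  lens.length = R.length ∧ fill.length = R.length ∧
  (∀ i, i < R.length → lens.getD i 0 ≤ (R.getD i []).length) ∧
  (∀ i, i < R.length → fill.getD i none ≠ none → lens.getD i 0 = 0) ∧
  (∀ i, i ∈ es ↔ (i < R.length ∧ lens.getD i 0 = 0 ∧ fill.getD i none = none)) ∧
  es.Pairwise (· < ·)

-- joint accumulator relation for the two argmax scans
def pvRel (R : List (List Int)) (V : List Nat) (k : Nat) (accA : Nat × Nat) (accB : Int × Nat) : Prop :=
  (2 ≤ accB.2 → accB.1 = (accA.1 : Int) ∧ accA.2 = accB.2 ∧ accA.1 < R.length ∧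
      (R.getD accA.1 []).length = accA.2 ∧ V.getD accA.1 0 = accB.2) ∧
  (accB.2 ≤ 1 → accB.1 = -1 ∧ accB.2 = 1 ∧ accA.2 ≤ 1) ∧
  (accA = (0, 0) → ∀ j, j < k → (R.getD j []).length = 0) ∧
  (accA = (0, 0) ∨ ((R.getD accA.1 []).length = accA.2 ∧ accA.1 < R.length))

theorem pv_step (R : List (List Int)) (V : List Nat) (k : Nat) (a v : Nat)
    (hav : a = v ∨ (a ≤ 1 ∧ v ≤ 1)) (hk : k < R.length)
    (hR : (R.getD k []).length = a) (hV : V.getD k 0 = v)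
    (accA : Nat × Nat) (accB : Int × Nat) (h : pvRel R V k accA accB) :
    pvRel R V (k+1) (if accA.2 < a then (k, a) else accA)
      (if accB.2 < v then ((k : Int), v) else accB) := by
  obtain ⟨iA, bA⟩ := accA
  obtain ⟨iB, bB⟩ := accB
  obtain ⟨h1, h2, h3, h4⟩ := h
  simp only at h1 h2 h3 h4 ⊢
  rcases Nat.lt_or_ge bB 2 with hb | hb
  · -- bB ≤ 1
    obtain ⟨e1, e2, e3⟩ := h2 (by omega)
    subst e1 e2
    rcases Nat.lt_or_ge 1 v with hv | hv
    · -- v ≥ 2, so a = v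
      have hav' : a = v := by rcases hav with h | ⟨h, h'⟩ <;> omega
      subst hav'
      rw [if_pos (by omega), if_pos (by omega)]
      refine ⟨fun _ => ⟨rfl, rfl, hk, hR, hV⟩, fun hc => by omega, fun hc => by
        simp at hc; omega, Or.inr ⟨hR, hk⟩⟩
    · -- v ≤ 1, B keeps
      have ha1 : a ≤ 1 := by rcases hav with h | ⟨h, h'⟩ <;> omega
      rw [if_neg (show ¬ ((1:Nat) < v) by omega)]
      by_cases hup : bA < a
      · rw [if_pos hup]
        refine ⟨fun hc => by omega, fun _ => ⟨rfl, rfl, ha1⟩, fun hc => ?_, Or.inr ⟨hR, hk⟩⟩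
        · have hk0 : k = 0 ∧ a = 0 := by
            constructor <;> [exact congrArg Prod.fst hc; exact congrArg Prod.snd hc]
          intro j hj
          have : j = 0 := by omega
          subst this
          rw [← hk0.1] at *
          omega
      · rw [if_neg hup]
        refine ⟨fun hc => by omega, fun _ => ⟨rfl, rfl, e3⟩, fun hc => ?_, h4⟩
        · intro j hj
          rcases Nat.lt_or_ge j k with hj' | hj'
          · exact h3 hc j hj'
          · have : j = k := by omega
            subst this
            have hbA0 : bA = 0 := congrArg Prod.snd hc
            omega
  · -- 2 ≤ bB
    obtain ⟨e1, e2, e3, e4, e5⟩ := h1 hb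
    rcases Nat.lt_or_ge bB v with hv | hv
    · -- B updates: v ≥ 3, a = v
      have hav' : a = v := by rcases hav with h | ⟨h, h'⟩ <;> omega
      subst hav'
      rw [if_pos hv, if_pos (by omega)]
      refine ⟨fun _ => ⟨rfl, rfl, hk, hR, hV⟩, fun hc => by omega, fun hc => ?_, Or.inr ⟨hR, hk⟩⟩
      · exfalso; have : a = 0 := congrArg Prod.snd hc; omega
    · -- both keep
      have hka : ¬ (bA < a) := by rcases hav with h | ⟨h, h'⟩ <;> omega
      rw [if_neg (show ¬ (bB < v) by omega), if_neg hka]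
      refine ⟨fun _ => ⟨e1, e2, e3, e4, e5⟩, fun hc => by omega, fun hc => ?_, h4⟩
      · exfalso; have : bA = 0 := congrArg Prod.snd hc; omega

theorem pv_sync (R : List (List Int)) (V : List Nat) (hlen : R.length = V.length)
    (hrel : ∀ j, (R.getD j []).length = V.getD j 0 ∨ ((R.getD j []).length ≤ 1 ∧ V.getD j 0 ≤ 1)) :
    ∀ (rs : List (List Int)) (ls : List Nat) (k : Nat), rs = R.drop k → ls = V.drop k →
    ∀ accA accB, pvRel R V k accA accB →
    pvRel R V (k + rs.length)
      ((rs.zipIdx k).foldl (fun best q => if best.2 < q.1.length then (q.2, q.1.length) else best) accA)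
      ((ls.zipIdx k).foldl (fun best q => if best.2 < q.1 then ((q.2 : Int), q.1) else best) accB) := by
  intro rs
  induction rs with
  | nil =>
    intro ls k hrs hls accA accB h
    have hk : R.length ≤ k := by
      rcases Nat.le_total R.length k with h | h
      · exact h
      · rcases Nat.eq_or_lt_of_le h with h' | h'
        · omega
        · rw [List.drop_eq_getElem_cons h'] at hrs
          exact absurd hrs.symm (List.cons_ne_nil _ _)
    have hls' : ls = [] := by
      rw [hls, List.drop_eq_nil_iff]
      omega
    subst hls'
    simpa using h
  | cons r rs' ih =>
    intro ls k hrs hls accA accB h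
    have hk : k < R.length := by
      have hlen' := congrArg List.length hrs
      simp [List.length_drop] at hlen'
      omega
    have hdec := List.drop_eq_getElem_cons hk
    rw [← hrs] at hdec
    obtain ⟨hr, hrs'⟩ := List.cons.injEq .. ▸ hdec
    have hkV : k < V.length := by omega
    have hlsdec : ls = V[k] :: V.drop (k+1) := by
      rw [hls, List.drop_eq_getElem_cons hkV]
    subst hlsdec
    simp only [List.zipIdx_cons, List.foldl_cons, List.length_cons]
    have hstep := pv_step R V k (R.getD k []).length (V.getD k 0) (hrel k) hk rfl rfl accA accB h
    have hRk : R.getD k [] = r := (List.getD_eq_getElem R [] hk).trans hr.symm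
    have hVk : V.getD k 0 = V[k] := List.getD_eq_getElem V 0 hkV
    rw [hRk, hVk] at hstep
    have hgoal := ih (V.drop (k+1)) (k+1) hrs' rfl _ _ hstep
    have harith : k + (rs'.length + 1) = (k + 1) + rs'.length := by omega
    rw [harith]
    have hlen2 : rs'.length = (V.drop (k+1)).length := by
      have := congrArg List.length hrs'
      simp [List.length_drop] at this ⊢
      omega
    simpa [hlen2] using hgoal

theorem pv_getD_set_self {α : Type} (l : List α) (i : Nat) (v d : α) (h : i < l.length) :
    (l.set i v).getD i d = v := by
  simp [List.getD_eq_getElem?_getD, h]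

theorem pv_getD_set_ne {α : Type} (l : List α) (i j : Nat) (v d : α) (h : i ≠ j) :
    (l.set i v).getD j d = l.getD j d := by
  simp [List.getD_eq_getElem?_getD, List.getElem?_set_ne, h]

theorem pv_getD_of_le {α : Type} (l : List α) (n : Nat) (d : α) (h : l.length ≤ n) :
    l.getD n d = d := by
  simp [List.getD_eq_getElem?_getD, List.getElem?_eq_none_iff.2 h]

theorem pv_ext_getD (l1 l2 : List (List Int)) (h : l1.length = l2.length)
    (h2 : ∀ i, i < l1.length → l1.getD i [] = l2.getD i []) : l1 = l2 := by
  apply List.ext_getElem h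
  intro i h1 h1'
  have := h2 i h1
  rwa [List.getD_eq_getElem _ _ h1, List.getD_eq_getElem _ _ h1'] at this

theorem pv_getLastD (l : List Int) (d : Int) : l.getLastD d = l.getD (l.length - 1) d := by
  cases l with
  | nil => simp
  | cons a t => simp [List.getLastD_eq_getLast?, List.getLast?_eq_getElem?, List.getD_eq_getElem?_getD]

theorem pv_getD_take (xs : List Int) (m i : Nat) (d : Int) (h : i < m) :
    (xs.take m).getD i d = xs.getD i d := by
  simp [List.getD_eq_getElem?_getD, h]

theorem pv_take_dropLast (xs : List Int) (m : Nat) (h : m ≤ xs.length) :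
    (xs.take m).dropLast = xs.take (m-1) := by
  rw [List.dropLast_eq_take, List.take_take, List.length_take]
  congr 1
  omega

theorem pvBuild_length (R : List (List Int)) (lens : List Nat) (fill : List (Option Int))
    (h1 : lens.length = R.length) (h2 : fill.length = R.length) :
    (pvBuild R lens fill).length = R.length := by
  simp [pvBuild, h1, h2]

theorem pvBuild_getD (R : List (List Int)) (lens : List Nat) (fill : List (Option Int))
    (h1 : lens.length = R.length) (h2 : fill.length = R.length) (i : Nat) (hi : i < R.length) :
    (pvBuild R lens fill).getD i [] =
      match fill.getD i none with
      | some v => [v]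
      | none => (R.getD i []).take (lens.getD i 0) := by
  have hb : i < (pvBuild R lens fill).length := by
    rw [pvBuild_length R lens fill h1 h2]; exact hi
  rw [List.getD_eq_getElem _ _ hb, List.getD_eq_getElem fill none (by omega),
    List.getD_eq_getElem lens 0 (by omega), List.getD_eq_getElem R [] hi]
  simp [pvBuild]

theorem pv_hrel (R : List (List Int)) (lens : List Nat) (fill : List (Option Int))
    (h1 : lens.length = R.length) (h2 : fill.length = R.length)
    (hle : ∀ i, i < R.length → lens.getD i 0 ≤ (R.getD i []).length)
    (hfz : ∀ i, i < R.length → fill.getD i none ≠ none → lens.getD i 0 = 0) :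
    ∀ j, ((pvBuild R lens fill).getD j []).length = lens.getD j 0 ∨
      (((pvBuild R lens fill).getD j []).length ≤ 1 ∧ lens.getD j 0 ≤ 1) := by
  intro j
  by_cases hj : j < R.length
  · rw [pvBuild_getD R lens fill h1 h2 j hj]
    cases hf : fill.getD j none with
    | none =>
      left
      rw [List.length_take]
      exact Nat.min_eq_left (hle j hj)
    | some v =>
      right
      have hz := hfz j hj (by rw [hf]; simp)
      exact ⟨by simp, by omega⟩
  · rw [pv_getD_of_le _ _ _ (by rw [pvBuild_length R lens fill h1 h2]; omega),
        pv_getD_of_le _ _ _ (by omega)]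
    left
    simp

theorem pv_sim (R : List (List Int)) :
    ∀ (es lens : List Nat) (fill : List (Option Int)) (fuel : Nat) (cur : List (List Int)),
    pvInv R es lens fill cur → es.length ≤ fuel →
    pvLoopA fuel cur = pvBuild R (pvLoopB R es lens fill).1 (pvLoopB R es lens fill).2 := by
  intro es
  induction es with
  | nil =>
    intro lens fill fuel cur hInv hfuel
    obtain ⟨hbuild, hlenl, hlenf, hle, hfz, hmem, hpw⟩ := hInv
    have hcurlen : cur.length = R.length := by
      rw [hbuild]; exact pvBuild_length R lens fill hlenl hlenf
    have hcount : cur.countP (fun r => r.isEmpty) = 0 := by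
      rw [List.countP_eq_zero]
      intro a ha
      obtain ⟨i, hi, hgi⟩ := List.mem_iff_getElem.1 ha
      have hin : i < R.length := by omega
      have hga : cur.getD i [] = a := by
        rw [List.getD_eq_getElem _ _ hi]; exact hgi
      rw [hbuild, pvBuild_getD R lens fill hlenl hlenf i hin] at hga
      cases hf : fill.getD i none with
      | some v => rw [hf] at hga; simp [← hga]
      | none =>
        rw [hf] at hga
        have hlz : lens.getD i 0 ≠ 0 := by
          intro hz
          exact (List.not_mem_nil) ((hmem i).2 ⟨hin, hz, hf⟩)
        have hlen_a : a.length = lens.getD i 0 := by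
          rw [← hga, List.length_take]
          exact Nat.min_eq_left (hle i hin)
        simp only [List.isEmpty_iff]
        intro hnil
        rw [hnil] at hlen_a
        simp at hlen_a
        exact hlz hlen_a.symm
    have hA : pvLoopA fuel cur = cur := by
      cases fuel with
      | zero => rfl
      | succ f => simp [pvLoopA, hcount]
    rw [hA, hbuild]
    rfl
  | cons e es' ih =>
    intro lens fill fuel cur hInv hfuel
    obtain ⟨hbuild, hlenl, hlenf, hle, hfz, hmem, hpw⟩ := hInv
    have hcurlen : cur.length = R.length := by
      rw [hbuild]; exact pvBuild_length R lens fill hlenl hlenf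
    obtain ⟨hen, hlz, hfe⟩ := (hmem e).1 (List.mem_cons_self ..)
    have hcur_e : cur.getD e [] = [] := by
      rw [hbuild, pvBuild_getD R lens fill hlenl hlenf e hen, hfe, hlz]
      simp
    cases fuel with
    | zero => simp at hfuel
    | succ fuel' =>
    have hecur : e < cur.length := by omega
    have hcount : 0 < cur.countP (fun r => r.isEmpty) := by
      rw [List.countP_pos_iff]
      refine ⟨[], ?_, by simp⟩
      have hg : cur[e] = [] := (List.getD_eq_getElem cur [] hecur).symm.trans hcur_e
      exact hg ▸ List.getElem_mem hecur
    -- the two argmax scans agree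
    have hs : pvRel cur lens (0 + cur.length) (pvArgmaxA cur) (pvArgmaxB lens) := by
      have hinit : pvRel cur lens 0 (0, 0) (-1, 1) := by
        refine ⟨fun h => absurd h (by norm_num), fun _ => ⟨rfl, rfl, by omega⟩,
          fun _ j hj => absurd hj (by omega), Or.inl rfl⟩
      exact pv_sync cur lens (by omega)
        (hbuild ▸ pv_hrel R lens fill hlenl hlenf hle hfz)
        cur lens 0 (by simp) (by simp) (0, 0) (-1, 1) hinit
    obtain ⟨RC1, RC2, RC3, RC4⟩ := hs
    by_cases hbb : 2 ≤ (pvArgmaxB lens).2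
    · -- a donor route with ≥ 2 customers exists: both sides move one element
      obtain ⟨g1, g2, g3, g4, g5⟩ := RC1 hbb
      set ib := (pvArgmaxA cur).1 with hibdef
      have hibn : ib < R.length := by omega
      have hiblens : ib < lens.length := by omega
      have hfib : fill.getD ib none = none := by
        cases hf : fill.getD ib none with
        | none => rfl
        | some v =>
          exfalso
          have hz := hfz ib hibn (by rw [hf]; simp)
          omega
      have hbig : cur.getD ib [] = (R.getD ib []).take (pvArgmaxB lens).2 := by
        rw [hbuild, pvBuild_getD R lens fill hlenl hlenf ib hibn, hfib, g5]
      have hbB_le : (pvArgmaxB lens).2 ≤ (R.getD ib []).length := g5 ▸ hle ib hibn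
      have hbiglen : (cur.getD ib []).length = (pvArgmaxB lens).2 := by
        rw [hbig, List.length_take]
        omega
      have hibe : ib ≠ e := by
        intro hcontra
        rw [hcontra] at g5
        omega
      -- A's first-empty index is e
      have hie : cur.findIdx (fun r => r.isEmpty) = e := by
        refine (List.findIdx_eq hecur).2 ⟨?_, ?_⟩
        · have hg : cur[e] = [] := (List.getD_eq_getElem cur [] hecur).symm.trans hcur_e
          rw [hg]
          simp
        · intro j hje
          have hjn : j < R.length := by omega
          have hjes : j ∉ (e :: es') := by
            intro hmemj
            rcases List.mem_cons.1 hmemj with h | h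
            · omega
            · have := (List.pairwise_cons.1 hpw).1 j h
              omega
          have hjprops : ¬(j < R.length ∧ lens.getD j 0 = 0 ∧ fill.getD j none = none) :=
            fun hc => hjes ((hmem j).2 hc)
          have hgj : cur.getD j [] = cur[j] := List.getD_eq_getElem cur [] (by omega : j < cur.length)
          have hgj2 : cur[j] = match fill.getD j none with
              | some v => [v]
              | none => (R.getD j []).take (lens.getD j 0) := by
            rw [← hgj, hbuild, pvBuild_getD R lens fill hlenl hlenf j hjn]
          cases hf : fill.getD j none with
          | some v =>
            rw [hf] at hgj2
            rw [hgj2]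
            simp
          | none =>
            rw [hf] at hgj2
            have hlnz : lens.getD j 0 ≠ 0 := fun hz => hjprops ⟨hjn, hz, hf⟩
            have hlenj : cur[j].length = lens.getD j 0 := by
              rw [hgj2, List.length_take]
              exact Nat.min_eq_left (hle j hjn)
            simp only [List.isEmpty_eq_false_iff, ← List.length_pos_iff]
            omega
      -- abbreviations for the updated state
      have hmoved : (cur.getD ib []).getLastD 0 = (R.getD ib []).getD ((pvArgmaxB lens).2 - 1) 0 := by
        rw [hbig, pv_getLastD, List.length_take, Nat.min_eq_left hbB_le,
          pv_getD_take _ _ _ _ (by omega)]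
      set bB := (pvArgmaxB lens).2 with hbBdef
      set lens2 := lens.set ib (bB - 1) with hlens2
      set fill2 := fill.set e (some ((R.getD ib []).getD (bB - 1) 0)) with hfill2
      set cur1 := cur.set ib ((cur.getD ib []).dropLast) with hcur1
      set cur2 := cur1.set e (cur1.getD e [] ++ [(cur.getD ib []).getLastD 0]) with hcur2
      have hcur1e : cur1.getD e [] = [] := by
        rw [hcur1, pv_getD_set_ne _ _ _ _ _ hibe, hcur_e]
      -- the new state satisfies the invariant
      have hlens2len : lens2.length = R.length := by rw [hlens2, List.length_set]; omega
      have hfill2len : fill2.length = R.length := by rw [hfill2, List.length_set]; omega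
      have hcur2len : cur2.length = R.length := by
        rw [hcur2, List.length_set, hcur1, List.length_set]; omega
      have hbuild2 : cur2 = pvBuild R lens2 fill2 := by
        apply pv_ext_getD _ _ (by rw [hcur2len, pvBuild_length R lens2 fill2 hlens2len hfill2len])
        intro i hi
        have hin : i < R.length := by omega
        rw [pvBuild_getD R lens2 fill2 hlens2len hfill2len i hin]
        by_cases hieq : i = e
        · subst hieq
          rw [hcur2, pv_getD_set_self _ _ _ _ (by rw [hcur1, List.length_set]; omega),
            hcur1e, hfill2, pv_getD_set_self _ _ _ _ (by omega : i < fill.length), hmoved]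
          simp
        · by_cases hiib : i = ib
          · subst hiib
            rw [hcur2, pv_getD_set_ne _ _ _ _ _ (Ne.symm hieq), hcur1,
              pv_getD_set_self _ _ _ _ (by omega : ib < cur.length),
              hfill2, pv_getD_set_ne _ _ _ _ _ (fun h => hieq h.symm),
              hfib, hlens2, pv_getD_set_self _ _ _ _ hiblens,
              hbig, pv_take_dropLast _ _ hbB_le]
          · rw [hcur2, pv_getD_set_ne _ _ _ _ _ (Ne.symm hieq), hcur1,
              pv_getD_set_ne _ _ _ _ _ (Ne.symm hiib),
              hfill2, pv_getD_set_ne _ _ _ _ _ (fun h => hieq h.symm),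
              hlens2, pv_getD_set_ne _ _ _ _ _ (fun h => hiib h.symm),
              hbuild, pvBuild_getD R lens fill hlenl hlenf i hin]
      have hInv2 : pvInv R es' lens2 fill2 cur2 := by
        refine ⟨hbuild2, hlens2len, hfill2len, ?_, ?_, ?_, (List.pairwise_cons.1 hpw).2⟩
        · intro i hin
          by_cases hiib : i = ib
          · subst hiib
            rw [hlens2, pv_getD_set_self _ _ _ _ hiblens]
            omega
          · rw [hlens2, pv_getD_set_ne _ _ _ _ _ (fun h => hiib h.symm)]
            exact hle i hin
        · intro i hin hfi
          by_cases hieq : i = e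
          · subst hieq
            rw [hlens2, pv_getD_set_ne _ _ _ _ _ hibe, hlz]
          · rw [hfill2, pv_getD_set_ne _ _ _ _ _ (fun h => hieq h.symm)] at hfi
            have hz := hfz i hin hfi
            have hiib : i ≠ ib := by
              intro hcontra
              rw [hcontra] at hz
              omega
            rw [hlens2, pv_getD_set_ne _ _ _ _ _ (fun h => hiib h.symm)]
            exact hz
        · intro i
          constructor
          · intro hi
            have hies : i ∈ (e :: es') := List.mem_cons_of_mem _ hi
            obtain ⟨hin, hz, hf⟩ := (hmem i).1 hies
            have hie2 : i ≠ e := by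
              intro hcontra
              subst hcontra
              exact (List.pairwise_cons.1 hpw).1 i hi |>.false
            have hiib : i ≠ ib := by
              intro hcontra
              rw [hcontra] at hz
              omega
            refine ⟨hin, ?_, ?_⟩
            · rw [hlens2, pv_getD_set_ne _ _ _ _ _ (fun h => hiib h.symm)]
              exact hz
            · rw [hfill2, pv_getD_set_ne _ _ _ _ _ (fun h => hie2 h.symm)]
              exact hf
          · rintro ⟨hin, hz, hf⟩
            have hie2 : i ≠ e := by
              intro hcontra
              subst hcontra
              rw [hfill2, pv_getD_set_self _ _ _ _ (by omega : i < fill.length)] at hf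
              exact Option.some_ne_none _ hf
            have hiib : i ≠ ib := by
              intro hcontra
              subst hcontra
              rw [hlens2, pv_getD_set_self _ _ _ _ hiblens] at hz
              omega
            rw [hlens2, pv_getD_set_ne _ _ _ _ _ (fun h => hiib h.symm)] at hz
            rw [hfill2, pv_getD_set_ne _ _ _ _ _ (fun h => hie2 h.symm)] at hf
            have := (hmem i).2 ⟨hin, hz, hf⟩
            rcases List.mem_cons.1 this with h | h
            · exact absurd h hie2
            · exact h
      have hih := ih lens2 fill2 fuel' cur2 hInv2 (by simpa using hfuel)
      -- unfold one step of A
      have hstepA : pvLoopA (fuel' + 1) cur = pvLoopA fuel' cur2 := by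
        simp only [pvLoopA]
        rw [if_pos hcount, if_neg (by rw [hbiglen]; omega), hie]
      -- unfold one step of B
      have hstepB : pvLoopB R (e :: es') lens fill = pvLoopB R es' lens2 fill2 := by
        simp only [pvLoopB]
        rw [if_neg (by rw [g1]; omega)]
        congr 1
        · rw [g1, Int.toNat_natCast, g5]
        · rw [g1, Int.toNat_natCast, g5, pv_getD_set_self _ _ _ _ hiblens]
      rw [hstepA, hstepB]
      exact hih
    · -- no route has more than one customer left: both sides stop
      obtain ⟨e1, e2, e3⟩ := RC2 (by omega)
      have hbreakA : (cur.getD (pvArgmaxA cur).1 []).length ≤ 1 := by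
        rcases RC4 with h | ⟨hval, hlt⟩
        · have h0 := RC3 h 0 (by omega)
          rw [h]
          show (cur.getD 0 []).length ≤ 1
          omega
        · omega
      have hA : pvLoopA (fuel' + 1) cur = cur := by
        simp only [pvLoopA]
        rw [if_pos hcount, if_pos hbreakA]
      have hB : pvLoopB R (e :: es') lens fill = (lens, fill) := by
        simp only [pvLoopB]
        rw [if_pos (by rw [e1]; omega)]
      rw [hA, hB, hbuild]

theorem pv_empties_mem (l : List Nat) :
    ∀ (k i : Nat), (i ∈ ((l.zipIdx k).filter (fun q => q.1 == 0)).map (fun q => q.2)) ↔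
      (k ≤ i ∧ i - k < l.length ∧ l.getD (i - k) 0 = 0) := by
  induction l with
  | nil => simp
  | cons a t ih =>
    intro k i
    simp only [List.zipIdx_cons, List.filter_cons]
    by_cases ha : a = 0
    · subst ha
      simp only [beq_self_eq_true, if_pos, List.map_cons, List.mem_cons, ih (k+1) i]
      constructor
      · rintro (h | ⟨h1, h2, h3⟩)
        · subst h
          exact ⟨le_refl _, by simp, by simp⟩
        · refine ⟨by omega, by simp; omega, ?_⟩
          have : i - k = (i - (k+1)) + 1 := by omega
          rw [this, List.getD_cons_succ]
          exact h3
      · rintro ⟨h1, h2, h3⟩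
        by_cases hik : i = k
        · exact Or.inl hik
        · refine Or.inr ⟨by omega, by simp at h2; omega, ?_⟩
          have : i - k = (i - (k+1)) + 1 := by omega
          rw [this, List.getD_cons_succ] at h3
          exact h3
    · rw [if_neg (by simpa using ha)]
      rw [ih (k+1) i]
      constructor
      · rintro ⟨h1, h2, h3⟩
        refine ⟨by omega, by simp; omega, ?_⟩
        have : i - k = (i - (k+1)) + 1 := by omega
        rw [this, List.getD_cons_succ]
        exact h3
      · rintro ⟨h1, h2, h3⟩
        have hik : i ≠ k := by
          intro hc
          subst hc
          simp at h3
          exact ha h3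
        refine ⟨by omega, by simp at h2; omega, ?_⟩
        have : i - k = (i - (k+1)) + 1 := by omega
        rw [this, List.getD_cons_succ] at h3
        exact h3

theorem pv_empties_pairwise (l : List Nat) :
    ∀ (k : Nat), (((l.zipIdx k).filter (fun q => q.1 == 0)).map (fun q => q.2)).Pairwise (· < ·) := by
  induction l with
  | nil => simp
  | cons a t ih =>
    intro k
    simp only [List.zipIdx_cons, List.filter_cons]
    by_cases ha : a = 0
    · subst ha
      simp only [beq_self_eq_true, if_pos, List.map_cons]
      rw [List.pairwise_cons]
      refine ⟨?_, ih (k+1)⟩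
      intro x hx
      have := ((pv_empties_mem t (k+1) x).1 hx).1
      omega
    · rw [if_neg (by simpa using ha)]
      exact ih (k+1)

-- ===== VERDICT (by name: the statement is the Claim_ definition above) =====
theorem ensure_all_vehicles_used_spec : Claim_equal_ensure_all_vehicles_used := by
  intro routes customer_count vehicle_count _hdom
  unfold Spec_ensure_all_vehicles_used ensure_all_vehicles_used ensure_all_vehicles_used_alt
  rw [List.map_id']
  show pvLoopA routes.length routes =
    pvBuild routes
      (pvLoopB routes (((routes.map List.length).zipIdx.filter (fun q => q.1 == 0)).map (fun q => q.2))
        (routes.map List.length) (routes.map (fun _ => none))).1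
      (pvLoopB routes (((routes.map List.length).zipIdx.filter (fun q => q.1 == 0)).map (fun q => q.2))
        (routes.map List.length) (routes.map (fun _ => none))).2
  have hlens0 : ∀ i, i < routes.length → (routes.map List.length).getD i 0 = (routes.getD i []).length := by
    intro i hi
    rw [List.getD_eq_getElem _ _ (by simpa using hi), List.getD_eq_getElem _ _ hi]
    simp
  have hfill0 : ∀ i, (routes.map (fun _ => (none : Option Int))).getD i none = none := by
    intro i
    rcases h : routes[i]? with _ | r
    · simp [List.getD_eq_getElem?_getD, h]
    · simp [List.getD_eq_getElem?_getD, h]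
  have hlens0len : (routes.map List.length).length = routes.length := by simp
  have hfill0len : (routes.map (fun _ => (none : Option Int))).length = routes.length := by simp
  have hbuild0 : routes = pvBuild routes (routes.map List.length) (routes.map (fun _ => none)) := by
    apply pv_ext_getD _ _ (by rw [pvBuild_length _ _ _ hlens0len hfill0len])
    intro i hi
    rw [pvBuild_getD _ _ _ hlens0len hfill0len i hi, hfill0 i, hlens0 i hi]
    simp
  apply pv_sim routes _ _ _ routes.length routes
  · refine ⟨hbuild0, hlens0len, hfill0len, ?_, ?_, ?_, pv_empties_pairwise _ 0⟩
    · intro i hi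
      rw [hlens0 i hi]
    · intro i _ hf
      exact absurd (hfill0 i) hf
    · intro i
      rw [pv_empties_mem _ 0 i]
      simp only [Nat.sub_zero, Nat.zero_le, true_and]
      constructor
      · rintro ⟨h1, h2⟩
        exact ⟨by omega, h2, hfill0 i⟩
      · rintro ⟨h1, h2, _⟩
        exact ⟨by omega, h2⟩
  · calc (((routes.map List.length).zipIdx.filter (fun q => q.1 == 0)).map (fun q => q.2)).length
        = ((routes.map List.length).zipIdx.filter (fun q => q.1 == 0)).length := List.length_map ..
      _ ≤ ((routes.map List.length).zipIdx).length := List.length_filter_le _ _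
      _ = routes.length := by simp
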